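-- pv_equiv track=rewrite | github.com/rlyyah/hackerrank | the_perfect_team/the_perfect_team.py | differentTeams
-- ===== SOURCE A (Python) =====
-- def differentTeams(skills):
--     skills_dir = {}
--     team_amount = 0
--     create_team = False
--     team_string = 'pcmbz'
--     for letter in skills:
--         if letter in team_string:
--             if letter not in skills_dir:
--                 skills_dir[letter] = 1
--             else:
--                 skills_dir[letter] += 1
--     if len(skills_dir) == 5:
--         create_team = True
--     while create_team:
--         team_amount += 1
--         for elements in skills_dir:
--             skills_dir[elements] -= 1
--             if skills_dir[elements] == 0:
--                 create_team = False
--     return team_amount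
-- ===== SOURCE B (Python) =====
-- def differentTeams(skills):
--     counts = [skills.count(c) for c in 'pcmbz']
--     return 0 if 0 in counts else min(counts)
-- ===== Notes on version B (the rewrite author's own statement) =====
-- stated objective: simpler
-- what changed: A builds a frequency dict in one pass and then counts down all five counters in a while loop until one reaches zero; B computes the five letter counts with str.count and returns min(counts) directly (0 if any letter is absent), eliminating the dict and the count-down while loop.
import Mathlib
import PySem

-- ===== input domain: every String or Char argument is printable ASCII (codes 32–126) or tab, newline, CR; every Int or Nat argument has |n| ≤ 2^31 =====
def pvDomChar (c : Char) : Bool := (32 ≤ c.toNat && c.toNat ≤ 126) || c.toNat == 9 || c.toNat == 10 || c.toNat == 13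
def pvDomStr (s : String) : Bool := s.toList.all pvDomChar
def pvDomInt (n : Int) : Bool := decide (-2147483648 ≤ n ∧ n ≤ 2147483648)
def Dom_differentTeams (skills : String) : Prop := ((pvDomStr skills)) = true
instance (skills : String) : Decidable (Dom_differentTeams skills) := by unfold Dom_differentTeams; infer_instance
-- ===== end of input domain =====

-- B replaces A's dict-building pass and count-down while loop with five str.count passes and a closed-form min (objective: simpler).


-- ===== PORT A =====
-- the 'while create_team' loop; fuel = skills.length + 1 only makes it total,
-- the lemmas below prove it is enough (the loop runs min-count ≤ length rounds)
def differentTeamsLoop : Nat → PySem.Dict Char Int → Int → Bool → Int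
  | 0, _, team_amount, _ => team_amount
  | fuel + 1, skills_dir, team_amount, create_team =>
    if create_team then
      let team_amount := team_amount + 1
      -- 'for elements in skills_dir: skills_dir[elements] -= 1; if … == 0: create_team = False'
      -- (keys are unchanged by the value updates, so iterating the entry key list is exact;
      --  every iterated key is present, so the default 0 of modify/getD is never used)
      let st := skills_dir.keys.foldl
        (fun (st : PySem.Dict Char Int × Bool) elements =>
          let d := st.1.modify elements 0 (· - 1)
          (d, if d.getD elements 0 == 0 then false else st.2))
        (skills_dir, create_team)
      differentTeamsLoop fuel st.1 team_amount st.2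
    else team_amount

def differentTeams (skills : String) : Int :=
  let team_string := "pcmbz"
  let skills_dir : PySem.Dict Char Int :=
    skills.toList.foldl
      (fun d letter =>
        if PySem.Str.isIn (String.ofList [letter]) team_string then
          if d.contains letter = false then d.insert letter 1
          else d.modify letter 0 (· + 1)
        else d)
      PySem.Dict.empty
  let create_team : Bool := skills_dir.items.length == 5
  differentTeamsLoop (skills.toList.length + 1) skills_dir 0 create_team

-- ===== PORT B =====
def differentTeams_alt (skills : String) : Int :=
  let counts : List Int :=
    "pcmbz".toList.map (fun c => (PySem.Str.count skills (String.ofList [c]) : Int))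
  -- 'return 0 if 0 in counts else min(counts)'; counts always has 5 elements,
  -- so Python's min never sees an empty list and the .getD 0 default is never taken
  if counts.contains 0 then 0 else (PySem.List.min? counts (fun y => y)).getD 0

-- ===== PRECONDITION & SPEC =====
def Spec_differentTeams (skills : String) (out : Int) : Prop := out = differentTeams_alt skills
instance (skills : String) (out : Int) : Decidable (Spec_differentTeams skills out) := by unfold Spec_differentTeams; infer_instance

-- ===== CLAIM (what is proved, stated in full; the proofs are below) =====
def Claim_equal_differentTeams : Prop := ∀ (skills : String), Dom_differentTeams skills → Spec_differentTeams skills (differentTeams skills)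

-- ===== LEMMAS AND PROOFS =====

-- the five team letters, as proofs refer to them
def pvTeam : List Char := ['p', 'c', 'm', 'b', 'z']

-- s.count(c) for a single character equals List.count
theorem pvCountGoSingleton (c : Char) : ∀ (fuel : Nat) (l : List Char) (acc : Nat),
    l.length ≤ fuel → PySem.Chars.count.go [c] fuel l acc = acc + l.count c := by
  intro fuel
  induction fuel with
  | zero =>
    intro l acc h
    have : l = [] := List.eq_nil_of_length_eq_zero (by omega)
    subst this; simp [PySem.Chars.count.go]
  | succ f ih =>
    intro l acc h
    cases l with
    | nil => simp [PySem.Chars.count.go]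
    | cons x t =>
      simp only [PySem.Chars.count.go]
      by_cases hx : c = x
      · subst hx
        rw [if_pos (by simp [List.isPrefixOf])]
        simp only [List.length_cons, List.length_nil, List.drop_succ_cons, List.drop_zero]
        rw [ih t (acc + 1) (by simpa using Nat.le_of_succ_le_succ h)]
        simp [List.count_cons]
        omega
      · rw [if_neg (by simp [List.isPrefixOf, hx])]
        rw [ih t acc (by simpa using Nat.le_of_succ_le_succ h)]
        simp [List.count_cons, Ne.symm hx]

theorem pvCountSingleton (s : List Char) (c : Char) :
    PySem.Chars.count s [c] = s.count c := by
  simp only [PySem.Chars.count, List.isEmpty_cons, if_false]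
  simpa using pvCountGoSingleton c s.length s 0 le_rfl

-- 'letter in team_string' for a single character is list membership
theorem pvIsInSingleton (c : Char) (l : List Char) :
    PySem.Chars.isIn [c] l = l.contains c := by
  by_cases h : c ∈ l
  · rw [(PySem.Chars.isIn_iff_infix [c] l).2 ((List.singleton_infix_iff c l).2 h)]
    simp [h]
  · have : ¬ PySem.Chars.isIn [c] l = true := fun hh =>
      h ((List.singleton_infix_iff c l).1 ((PySem.Chars.isIn_iff_infix [c] l).1 hh))
    simp only [Bool.not_eq_true] at this
    simp [this, h]

-- all-congruence over members (membership-strength version of List.all_congr)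
theorem pvAllCongr {t : List Char} {p q : Char → Bool} (h : ∀ x ∈ t, p x = q x) :
    t.all p = t.all q := by
  induction t with
  | nil => rfl
  | cons a l ih => simp [List.all_cons, h a (by simp), ih (fun x hx => h x (by simp [hx]))]

-- one round of the inner for loop: all values decremented, keys kept, flag cleared iff some value hit 0
theorem pvRound (ks : List Char) : ∀ (d : PySem.Dict Char Int) (cr : Bool),
    ks.Nodup →
    (ks.foldl
      (fun (st : PySem.Dict Char Int × Bool) elements =>
        let d := st.1.modify elements 0 (· - 1)
        (d, if d.getD elements 0 == 0 then false else st.2))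
      (d, cr)) =
    ((ks.foldl (fun d x => d.modify x 0 (· - 1)) d),
     cr && ks.all (fun k => !(d.getD k 0 - 1 == 0))) := by
  induction ks with
  | nil => intro d cr _; simp
  | cons k t ih =>
    intro d cr hnd
    have hk : k ∉ t := (List.nodup_cons.1 hnd).1
    simp only [List.foldl_cons, List.all_cons]
    rw [ih _ _ (List.nodup_cons.1 hnd).2]
    have hself : (d.modify k 0 (· - 1)).getD k 0 = d.getD k 0 - 1 :=
      PySem.Dict.getD_modify_self d k 0 (· - 1)
    have hall : t.all (fun k' => !((d.modify k 0 (· - 1)).getD k' 0 - 1 == 0)) =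
        t.all (fun k' => !(d.getD k' 0 - 1 == 0)) := by
      refine pvAllCongr (fun k' hk' => ?_)
      rw [PySem.Dict.getD_modify_of_ne d 0 (· - 1) (by rintro rfl; exact hk hk')]
    simp only [hself, hall]
    by_cases h0 : d.getD k 0 - 1 = 0
    · have h0' : (d.getD k 0 - 1 == 0) = true := beq_iff_eq.mpr h0
      simp [h0']
    · have h0' : (d.getD k 0 - 1 == 0) = false := beq_eq_false_iff_ne.mpr h0
      simp [h0']

theorem pvRoundGetD (ks : List Char) : ∀ (d : PySem.Dict Char Int) (j : Char),
    ks.Nodup →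
    (ks.foldl (fun d x => d.modify x 0 (· - 1)) d).getD j 0 =
      if j ∈ ks then d.getD j 0 - 1 else d.getD j 0 := by
  induction ks with
  | nil => intro d j _; simp
  | cons k t ih =>
    intro d j hnd
    have hk : k ∉ t := (List.nodup_cons.1 hnd).1
    simp only [List.foldl_cons]
    rw [ih _ j (List.nodup_cons.1 hnd).2]
    by_cases hj : j ∈ t
    · have hjk : j ≠ k := fun h => hk (h ▸ hj)
      rw [if_pos hj, if_pos (List.mem_cons.2 (Or.inr hj)),
        PySem.Dict.getD_modify_of_ne d 0 (· - 1) hjk]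
    · by_cases hjk : j = k
      · subst hjk
        rw [if_neg hj, if_pos (List.mem_cons.2 (Or.inl rfl))]
        exact PySem.Dict.getD_modify_self d j 0 (· - 1)
      · rw [if_neg hj, if_neg (by simp [hjk, hj]),
          PySem.Dict.getD_modify_of_ne d 0 (· - 1) hjk]

theorem pvRoundKeys (ks : List Char) : ∀ (d : PySem.Dict Char Int),
    (∀ k ∈ ks, d.contains k = true) →
    (ks.foldl (fun d x => d.modify x 0 (· - 1)) d).keys = d.keys := by
  induction ks with
  | nil => intro d _; rfl
  | cons k t ih =>
    intro d hc
    simp only [List.foldl_cons]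
    have h1 : (d.modify k 0 (· - 1)).keys = d.keys := by
      rw [PySem.Dict.keys_modify,
        PySem.Dict.keys_insert_of_contains d _ (hc k (List.mem_cons.2 (Or.inl rfl)))]
    rw [ih _ (fun k' hk' => by
      rw [PySem.Dict.contains_modify]
      simp [hc k' (List.mem_cons.2 (Or.inr hk'))]), h1]

theorem pvLoopFalse (fuel : Nat) (d : PySem.Dict Char Int) (a : Int) :
    differentTeamsLoop fuel d a false = a := by
  cases fuel <;> simp [differentTeamsLoop]

theorem pvLoopEq : ∀ (fuel : Nat) (d : PySem.Dict Char Int) (a : Int) (m : Int),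
    d.keys ≠ [] → d.keys.Nodup →
    (∀ k ∈ d.keys, m ≤ d.getD k 0) → (∃ k ∈ d.keys, d.getD k 0 = m) →
    0 < m → m.toNat ≤ fuel →
    differentTeamsLoop fuel d a true = a + m := by
  intro fuel
  induction fuel with
  | zero => intro d a m _ _ _ _ hpos hf; omega
  | succ f ih =>
    intro d a m hne hnd hlb ⟨k0, hk0, hv0⟩ hpos hf
    simp only [differentTeamsLoop]
    rw [pvRound d.keys d true hnd]
    set d' := d.keys.foldl (fun d x => d.modify x 0 (· - 1)) d with hd'
    have hcont : ∀ k ∈ d.keys, d.contains k = true :=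
      fun k hk => (PySem.Dict.contains_iff_mem_keys d k).2 hk
    have hkeys' : d'.keys = d.keys := pvRoundKeys d.keys d hcont
    have hget' : ∀ j ∈ d.keys, d'.getD j 0 = d.getD j 0 - 1 := fun j hj => by
      rw [hd', pvRoundGetD d.keys d j hnd, if_pos hj]
    by_cases hm1 : m = 1
    · -- some count hits 0: the flag clears and the next iteration returns
      have hflag : (d.keys.all fun k => !(d.getD k 0 - 1 == 0)) = false := by
        refine List.all_eq_false.2 ⟨k0, hk0, ?_⟩
        simp [hv0, hm1]
      rw [hflag, Bool.and_false, pvLoopFalse]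
      simp only [if_pos trivial]
      omega
    · -- all counts stay positive: recurse with m - 1
      have hflag : (d.keys.all fun k => !(d.getD k 0 - 1 == 0)) = true := by
        refine List.all_eq_true.2 (fun k hk => ?_)
        have := hlb k hk
        simp only [Bool.not_eq_eq_eq_not, Bool.not_true, beq_eq_false_iff_ne]
        omega
      rw [hflag, Bool.and_true]
      have : differentTeamsLoop f d' (a + 1) true = (a + 1) + (m - 1) := by
        refine ih d' (a + 1) (m - 1) (hkeys' ▸ hne) (hkeys' ▸ hnd) ?_ ?_ (by omega) (by omega)
        · intro k hk
          rw [hget' k (hkeys' ▸ hk)]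
          have := hlb k (hkeys' ▸ hk)
          omega
        · exact ⟨k0, hkeys' ▸ hk0, by rw [hget' k0 hk0, hv0]⟩
      rw [this]
      simp only [if_pos trivial]
      ring

-- the dict-building pass of A counts the team letters of the string
theorem pvBuildEq (s : List Char) :
    s.foldl
      (fun d letter =>
        if PySem.Str.isIn (String.ofList [letter]) "pcmbz" then
          if d.contains letter = false then d.insert letter 1
          else d.modify letter 0 (· + 1)
        else d)
      (PySem.Dict.empty : PySem.Dict Char Int) =
    (s.filter (fun c => pvTeam.contains c)).foldl
      (fun d x => d.modify x 0 (· + 1)) (PySem.Dict.empty : PySem.Dict Char Int) := by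
  rw [List.foldl_filter]
  refine List.foldl_ext _ _ _ (fun d letter _ => ?_)
  have hIs : PySem.Str.isIn (String.ofList [letter]) "pcmbz" = pvTeam.contains letter := by
    rw [PySem.Str.isIn_eq]
    have h1 : (String.ofList [letter]).toList = [letter] := by simp
    rw [h1, pvIsInSingleton]
    rfl
  rw [hIs]
  by_cases hin : pvTeam.contains letter
  · rw [if_pos hin, if_pos hin]
    by_cases hc : d.contains letter = false
    · rw [if_pos hc]
      have : d.modify letter 0 (· + 1) = d.insert letter (d.getD letter 0 + 1) := rfl
      rw [this, PySem.Dict.getD_of_not_contains d 0 hc]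
      norm_num
    · rw [if_neg hc]
  · rw [if_neg hin, if_neg hin]

-- ===== VERDICT (by name: the statement is the Claim_ definition above) =====
theorem differentTeams_spec : Claim_equal_differentTeams := by
  unfold Claim_equal_differentTeams
  intro skills _
  unfold Spec_differentTeams
  simp only [differentTeams, differentTeams_alt]
  set s := skills.toList with hs
  rw [pvBuildEq s]
  set xs := s.filter (fun c => pvTeam.contains c) with hxs
  set d0 : PySem.Dict Char Int := xs.foldl (fun d x => d.modify x 0 (· + 1)) PySem.Dict.empty with hd0
  have hgetD : ∀ v, d0.getD v 0 = (xs.count v : Int) := by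
    intro v
    rw [hd0, PySem.Dict.getD_foldl_modify_add_one, PySem.Dict.getD_empty]
    ring
  have hkeys : d0.keys = PySem.Set.ofList xs := by
    rw [hd0, PySem.Dict.keys_foldl_modify xs 0 (fun _ _ => (· + 1)),
      PySem.Dict.keys_empty, PySem.Set.update_nil_left]
  have hnd : d0.keys.Nodup := by rw [hkeys]; exact PySem.Set.nodup_ofList xs
  have hsub : ∀ k ∈ d0.keys, k ∈ pvTeam := by
    intro k hk
    rw [hkeys, PySem.Set.mem_ofList] at hk
    have := (List.mem_filter.1 hk).2
    simpa using this
  have hmemkeys : ∀ c, c ∈ pvTeam → c ∈ s → c ∈ d0.keys := by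
    intro c hc hcs
    rw [hkeys, PySem.Set.mem_ofList, hxs]
    exact List.mem_filter.2 ⟨hcs, by simpa using hc⟩
  have hcnt : ∀ c ∈ pvTeam, xs.count c = s.count c := by
    intro c hc
    rw [hxs, List.count_filter]
    simp [hc]
  have hcounts : "pcmbz".toList.map (fun c => (PySem.Str.count skills (String.ofList [c]) : Int)) =
      pvTeam.map (fun c => (s.count c : Int)) := by
    rw [(rfl : "pcmbz".toList = pvTeam)]
    refine List.map_congr_left (fun c _ => ?_)
    rw [PySem.Str.count_eq]
    have h1 : (String.ofList [c]).toList = [c] := by simp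
    rw [h1, ← hs, pvCountSingleton]
  rw [hcounts]
  set g : Char → Int := fun c => (s.count c : Int) with hg
  have hlenk : d0.items.length = d0.keys.length := by
    simp [PySem.Dict.keys]
  by_cases hz : (pvTeam.map g).contains (0 : Int)
  · -- some team letter is absent: A's dict has fewer than 5 keys, B sees a zero count
    rw [if_pos hz]
    obtain ⟨c, hc, hc0⟩ := List.exists_of_mem_map (List.contains_iff_mem.1 hz)
    have hcz : s.count c = 0 := by simp only [hg] at hc0; exact_mod_cast hc0
    have hne5 : d0.items.length ≠ 5 := by
      intro h5
      have hlen5 : d0.keys.length = 5 := by omega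
      have hcard : d0.keys.toFinset.card = 5 := by
        rw [List.toFinset_card_of_nodup hnd, hlen5]
      have hsubF : d0.keys.toFinset ⊆ pvTeam.toFinset := fun x hx =>
        List.mem_toFinset.2 (hsub x (List.mem_toFinset.1 hx))
      have hcardT : pvTeam.toFinset.card = 5 := by decide
      have heq : d0.keys.toFinset = pvTeam.toFinset :=
        Finset.eq_of_subset_of_card_le hsubF (by omega)
      have hck : c ∈ d0.keys := by
        have : c ∈ pvTeam.toFinset := List.mem_toFinset.2 hc
        rw [← heq] at this
        exact List.mem_toFinset.1 this
      rw [hkeys, PySem.Set.mem_ofList] at hck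
      have hcs : c ∈ s := (List.mem_filter.1 hck).1
      have := List.count_pos_iff.2 hcs
      omega
    have hcreate : (d0.items.length == 5) = false := beq_eq_false_iff_ne.mpr hne5
    rw [hcreate, pvLoopFalse]
  · rw [if_neg hz]
    have hposc : ∀ c ∈ pvTeam, 0 < s.count c := by
      intro c hc
      by_contra h
      have hc0 : s.count c = 0 := by omega
      exact hz (List.contains_iff_mem.2 (by
        refine List.mem_map.2 ⟨c, hc, ?_⟩
        simp [hg, hc0]))
    have hTk : ∀ c ∈ pvTeam, c ∈ d0.keys := fun c hc =>
      hmemkeys c hc (List.count_pos_iff.1 (hposc c hc))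
    have hlen5 : d0.keys.length = 5 := by
      have hsubF : d0.keys.toFinset ⊆ pvTeam.toFinset := fun x hx =>
        List.mem_toFinset.2 (hsub x (List.mem_toFinset.1 hx))
      have hsupF : pvTeam.toFinset ⊆ d0.keys.toFinset := fun x hx =>
        List.mem_toFinset.2 (hTk x (List.mem_toFinset.1 hx))
      have heq : d0.keys.toFinset = pvTeam.toFinset := Finset.Subset.antisymm hsubF hsupF
      have := List.toFinset_card_of_nodup hnd
      have hcardT : pvTeam.toFinset.card = 5 := by decide
      rw [heq, hcardT] at this
      omega
    have hcreate : (d0.items.length == 5) = true := beq_iff_eq.mpr (by omega)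
    rw [hcreate]
    have hmap : pvTeam.map g = g 'p' :: [g 'c', g 'm', g 'b', g 'z'] := rfl
    set M : Int := [g 'c', g 'm', g 'b', g 'z'].foldl min (g 'p') with hM
    have hmin : PySem.List.min? (pvTeam.map g) (fun y => y) = some M := by
      rw [hmap, PySem.List.min?_id_cons]
    obtain ⟨c0, hc0T, hc0M⟩ := List.exists_of_mem_map (PySem.List.min?_mem hmin)
    have hlb : ∀ y ∈ pvTeam.map g, M ≤ y := PySem.List.min?_isMin hmin
    have hA : differentTeamsLoop (s.length + 1) d0 0 true = 0 + M := by
      refine pvLoopEq (s.length + 1) d0 0 M ?_ hnd ?_ ?_ ?_ ?_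
      · intro h
        rw [h] at hlen5
        simp at hlen5
      · intro k hk
        rw [hgetD k, hcnt k (hsub k hk)]
        exact hlb _ (List.mem_map_of_mem (hsub k hk))
      · refine ⟨c0, hTk c0 hc0T, ?_⟩
        rw [hgetD c0, hcnt c0 hc0T]
        exact hc0M
      · have := hposc c0 hc0T
        simp only [hg] at hc0M
        omega
      · have h1 := List.count_le_length (a := c0) (l := s)
        simp only [hg] at hc0M
        omega
    rw [hA, hmin]
    simp
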